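-- pv_equiv track=rewrite | github.com/akovchegin/algorithms-templates | python/sprint3/L/two_bicycle.py | find_day
-- ===== SOURCE A (Python) =====
-- def find_day(arr, price, left, right):
--     if arr[right] < price:
--         return -1
--     if left == right:
--         return right
--     mid = (left+right) // 2
--     if arr[mid] >= price:
--         return find_day(arr, price, left, mid)
--     else:
--         return find_day(arr, price, mid+1, right)
-- ===== SOURCE B (Python) =====
-- def find_day(arr, price, left, right):
--     if arr[right] < price:
--         return -1
--     while left < right:
--         mid = (left + right) // 2
--         if arr[mid] >= price:
--             right = mid
--         else:
--             left = mid + 1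
--     return right
-- ===== Notes on version B (the rewrite author's own statement) =====
-- stated objective: idiomatic
-- what changed: The recursive self-calls with a sentinel check re-evaluated at every level are replaced by a single upfront sentinel check and an iterative while-loop narrowing [left, right].
-- outside the precondition, e.g. on find_day([1, 5], 2, -3, 1): A returns -1, B returns -1
import Mathlib
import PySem

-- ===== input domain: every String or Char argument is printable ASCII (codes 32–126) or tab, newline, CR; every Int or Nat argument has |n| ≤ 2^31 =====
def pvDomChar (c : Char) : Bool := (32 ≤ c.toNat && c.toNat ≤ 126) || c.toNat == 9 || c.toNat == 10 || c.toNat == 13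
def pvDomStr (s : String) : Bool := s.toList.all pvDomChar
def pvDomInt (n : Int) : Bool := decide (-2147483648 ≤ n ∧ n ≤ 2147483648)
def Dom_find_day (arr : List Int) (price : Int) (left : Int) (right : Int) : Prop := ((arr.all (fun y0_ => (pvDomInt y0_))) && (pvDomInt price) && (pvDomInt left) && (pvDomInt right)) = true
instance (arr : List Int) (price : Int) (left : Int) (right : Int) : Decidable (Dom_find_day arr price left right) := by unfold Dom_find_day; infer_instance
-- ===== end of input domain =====

-- B replaces A's recursive self-calls (which re-check the arr[right] sentinel at every level)
-- by one upfront sentinel check and an iterative window-narrowing loop; objective: idiomatic.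


-- ===== PORT A =====
-- A's recursion, made total with fuel ((right-left).toNat + 1 steps always suffice on Pre_,
-- since the window shrinks strictly at every recursive call); index accesses use pyGet?,
-- whose 'none' (Python IndexError) is excluded by Pre_ (getD 0 is then never the value used).
def find_day_go (arr : List Int) (price : Int) : Nat → Int → Int → Int
  | 0, _, _ => -1  -- unreachable under Pre_find_day
  | fuel + 1, left, right =>
    if (PySem.List.pyGet? arr right).getD 0 < price then -1
    else if left = right then right
    else
      let mid := PySem.Int.floordiv (left + right) 2
      if (PySem.List.pyGet? arr mid).getD 0 ≥ price then
        find_day_go arr price fuel left mid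
      else
        find_day_go arr price fuel (mid + 1) right

def find_day (arr : List Int) (price : Int) (left : Int) (right : Int) : Int :=
  find_day_go arr price ((right - left).toNat + 1) left right

-- ===== PORT B =====
-- the while-loop of Source B: narrows [left, right] while left < right
def find_day_loop (arr : List Int) (price : Int) (left : Int) (right : Int) : Int :=
  if h : left < right then
    let mid := PySem.Int.floordiv (left + right) 2
    if (PySem.List.pyGet? arr mid).getD 0 ≥ price then
      find_day_loop arr price left mid
    else
      find_day_loop arr price (mid + 1) right
  else right
termination_by (right - left).toNat
decreasing_by
  · have h2 : PySem.Int.floordiv (left + right) 2 = (left + right) / 2 :=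
      PySem.Int.floordiv_eq_ediv_of_pos (by omega)
    simp only [h2]; omega
  · have h2 : PySem.Int.floordiv (left + right) 2 = (left + right) / 2 :=
      PySem.Int.floordiv_eq_ediv_of_pos (by omega)
    simp only [h2]; omega

def find_day_alt (arr : List Int) (price : Int) (left : Int) (right : Int) : Int :=
  if (PySem.List.pyGet? arr right).getD 0 < price then -1
  else find_day_loop arr price left right

-- ===== PRECONDITION & SPEC =====
-- Pre_ keeps the inputs on which the Python A returns: a valid (possibly negative) index
-- right, and — unless the sentinel arr[right] < price makes A return -1 at once — a
-- non-inverted window whose left end is also a valid index, so every index touched lies in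
-- [left, right]. It excludes inverted or left-out-of-range windows past the sentinel, where
-- A raises (RecursionError or IndexError) except on rare wraparound windows with
-- left < -len(arr) where A's return is an accident of negative-index wraparound (B agrees
-- there when A returns; see the cite).
def Pre_find_day (arr : List Int) (price : Int) (left : Int) (right : Int) : Prop :=
  -(arr.length : Int) ≤ right ∧ right < arr.length ∧
    (price ≤ (PySem.List.pyGet? arr right).getD 0 →
      left ≤ right ∧ -(arr.length : Int) ≤ left)
instance (arr : List Int) (price : Int) (left : Int) (right : Int) : Decidable (Pre_find_day arr price left right) := by unfold Pre_find_day; infer_instance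
def pvWitness_find_day : List Int × Int × Int × Int := ([1, 3, 3, 7], 3, 0, 3)
def Spec_find_day (arr : List Int) (price : Int) (left : Int) (right : Int) (out : Int) : Prop := out = find_day_alt arr price left right
instance (arr : List Int) (price : Int) (left : Int) (right : Int) (out : Int) : Decidable (Spec_find_day arr price left right out) := by unfold Spec_find_day; infer_instance

-- ===== CLAIM (what is proved, stated in full; the proofs are below) =====
def Claim_equal_find_day : Prop := ∀ (arr : List Int) (price : Int) (left : Int) (right : Int), Dom_find_day arr price left right → Pre_find_day arr price left right → Spec_find_day arr price left right (find_day arr price left right)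

-- ===== LEMMAS AND PROOFS =====

-- Main invariant: once the sentinel arr[right] ≥ price holds, A's recursion and B's loop agree;
-- the sentinel is preserved by both narrowing steps, so A's per-level re-check never fires again.
theorem find_day_go_eq_loop (arr : List Int) (price : Int) :
    ∀ (fuel : Nat) (left right : Int), left ≤ right → (right - left).toNat < fuel →
      ¬ (PySem.List.pyGet? arr right).getD 0 < price →
      find_day_go arr price fuel left right = find_day_loop arr price left right := by
  intro fuel
  induction fuel with
  | zero => intro l r _ h _; omega
  | succ n ih =>
    intro l r hlr hfuel hg
    rw [find_day_go, find_day_loop]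
    simp only [if_neg hg]
    by_cases he : l = r
    · subst he; simp
    · have hlt : l < r := by omega
      have h2 : PySem.Int.floordiv (l + r) 2 = (l + r) / 2 :=
        PySem.Int.floordiv_eq_ediv_of_pos (by omega)
      simp only [if_neg he, dif_pos hlt, h2]
      by_cases hm : (PySem.List.pyGet? arr ((l + r) / 2)).getD 0 ≥ price
      · simp only [if_pos hm]
        exact ih l ((l + r) / 2) (by omega) (by omega) (by omega)
      · simp only [if_neg hm]
        exact ih ((l + r) / 2 + 1) r (by omega) (by omega) hg

-- ===== VERDICT (by name: the statement is the Claim_ definition above) =====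
theorem find_day_spec : Claim_equal_find_day := by
  intro arr price l r _ hpre
  unfold Spec_find_day find_day find_day_alt
  rw [find_day_go]
  by_cases hg : (PySem.List.pyGet? arr r).getD 0 < price
  · simp [hg]
  · have hlr : l ≤ r := (hpre.2.2 (by omega)).1
    simp only [if_neg hg]
    by_cases he : l = r
    · rw [if_pos he, he, find_day_loop, dif_neg (lt_irrefl r)]
    · have hlt : l < r := by omega
      have h2 : PySem.Int.floordiv (l + r) 2 = (l + r) / 2 :=
        PySem.Int.floordiv_eq_ediv_of_pos (by omega)
      rw [find_day_loop]
      simp only [if_neg he, dif_pos hlt, h2]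
      by_cases hm : (PySem.List.pyGet? arr ((l + r) / 2)).getD 0 ≥ price
      · simp only [if_pos hm]
        exact find_day_go_eq_loop arr price _ l ((l + r) / 2) (by omega) (by omega) (by omega)
      · simp only [if_neg hm]
        exact find_day_go_eq_loop arr price _ ((l + r) / 2 + 1) r (by omega) (by omega) hg
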